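-- pv_equiv track=rewrite | github.com/almehj/project-euler | old/problem0051/p51_sames.py | gather_lists
-- ===== SOURCE A (Python) =====
-- def match_except(n,m,locs):
--
--     for i,(c1,c2) in enumerate(zip(n,m)):
--         if i not in locs:
--             if c1 != c2:
--                 return False
--     return True
--
-- def gather_lists(l,locs):
--
--     used = {}
--     answer = []
--
--     for i,n in enumerate(l):
--         if n in used:
--             continue
--         curr_set = [n]
--         used[n] = 1
--         for m in l[i+1:]:
--             if m in used:
--                 continue
--             if match_except(n,m,locs):
--                 curr_set.append(m)
--                 used[m] = 1
--         answer.append(curr_set)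
--
--     return answer
-- ===== SOURCE B (Python) =====
-- def gather_lists(l, locs):
--     # Dedupe first (first occurrences), then recursively partition the
--     # remaining strings around each head into its group and the rest.
--     seen = set()
--     distinct = []
--     for s in l:
--         if s not in seen:
--             seen.add(s)
--             distinct.append(s)
--
--     def same_outside(n, m):
--         for i, (c1, c2) in enumerate(zip(n, m)):
--             if c1 != c2 and i not in locs:
--                 return False
--         return True
--
--     answer = []
--     rest = distinct
--     while rest:
--         n = rest[0]
--         group = [n]
--         others = []
--         for m in rest[1:]:
--             if same_outside(n, m):
--                 group.append(m)
--             else: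
--                 others.append(m)
--         answer.append(group)
--         rest = others
--     return answer
-- ===== Notes on version B (the rewrite author's own statement) =====
-- stated objective: alternative
-- what changed: Replaces the index-driven nested loops sharing a 'used' dict by a one-pass dedup of the whole list followed by a repeated single-pass partition of the remaining strings around each head (group = head + matching tail, continue on the non-matching tail).
import Mathlib
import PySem

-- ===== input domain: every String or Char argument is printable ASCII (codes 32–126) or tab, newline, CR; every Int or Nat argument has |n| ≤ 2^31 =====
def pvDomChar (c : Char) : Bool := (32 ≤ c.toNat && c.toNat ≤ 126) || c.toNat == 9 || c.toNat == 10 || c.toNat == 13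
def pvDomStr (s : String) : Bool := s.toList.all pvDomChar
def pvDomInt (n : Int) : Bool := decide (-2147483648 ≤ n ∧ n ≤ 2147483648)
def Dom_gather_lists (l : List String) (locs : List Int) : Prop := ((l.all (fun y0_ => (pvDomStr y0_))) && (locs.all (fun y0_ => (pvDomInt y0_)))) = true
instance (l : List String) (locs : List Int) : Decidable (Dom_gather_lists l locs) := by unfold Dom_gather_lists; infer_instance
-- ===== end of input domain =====

-- B replaces A's index-driven nested loops over a shared 'used' dict by dedup-then-recursive-partition; same result, same asymptotic cost (objective: alternative).


-- ===== PORT A =====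
-- for i,(c1,c2) in enumerate(zip(n,m)): if i not in locs: if c1 != c2: return False
def matchExceptGo (locs : List Int) : List (Int × (Char × Char)) → Bool
  | [] => true
  | (i, (c1, c2)) :: rest =>
    if !(locs.contains i) then
      if c1 ≠ c2 then false else matchExceptGo locs rest
    else matchExceptGo locs rest

def match_except (n m : String) (locs : List Int) : Bool :=
  matchExceptGo locs (PySem.List.enumerate (n.toList.zip m.toList) 0)

-- inner loop: for m in l[i+1:] with state (used, curr_set)
def innerLoop (locs : List Int) (n : String) : List String → PySem.Dict String Int → List String → PySem.Dict String Int × List String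
  | [], used, curr => (used, curr)
  | m :: ms, used, curr =>
    if used.contains m then innerLoop locs n ms used curr
    else if match_except n m locs then innerLoop locs n ms (used.insert m 1) (curr ++ [m])
    else innerLoop locs n ms used curr

-- outer loop: for i,n in enumerate(l) with state (used, answer)
def outerLoop (l : List String) (locs : List Int) : List (Int × String) → PySem.Dict String Int → List (List String) → List (List String)
  | [], _, ans => ans
  | (i, n) :: ps, used, ans =>
    if used.contains n then outerLoop l locs ps used ans
    else
      let r := innerLoop locs n (PySem.List.slice l (some (i + 1)) none) (used.insert n 1) [n]
      outerLoop l locs ps r.1 (ans ++ [r.2])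

def gather_lists (l : List String) (locs : List Int) : List (List String) :=
  outerLoop l locs (PySem.List.enumerate l 0) PySem.Dict.empty []

-- ===== PORT B =====
-- for i,(c1,c2) in enumerate(zip(n,m)): if c1 != c2 and i not in locs: return False
def sameOutsideGo (locs : List Int) : List (Int × (Char × Char)) → Bool
  | [] => true
  | (i, (c1, c2)) :: rest =>
    if c1 != c2 && !(locs.contains i) then false else sameOutsideGo locs rest

def same_outside (locs : List Int) (n m : String) : Bool :=
  sameOutsideGo locs (PySem.List.enumerate (n.toList.zip m.toList) 0)

-- for s in l: if s not in seen: seen.add(s); distinct.append(s)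
def dedupLoop : List String → PySem.Set String → List String → List String
  | [], _, acc => acc
  | s :: ss, seen, acc =>
    if PySem.Set.contains seen s then dedupLoop ss seen acc
    else dedupLoop ss (PySem.Set.add seen s) (acc ++ [s])

-- for m in rest[1:]: append m to group if it matches n, to others if not
def splitGo (locs : List Int) (n : String) : List String → List String → List String → List String × List String
  | [], grp, oth => (grp, oth)
  | m :: ms, grp, oth =>
    if same_outside locs n m then splitGo locs n ms (grp ++ [m]) oth
    else splitGo locs n ms grp (oth ++ [m])

-- characterisation of splitGo; partitionLoop's termination cites it
theorem splitGo_eq (locs : List Int) (n : String) :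
    ∀ (ms grp oth : List String),
      splitGo locs n ms grp oth
        = (grp ++ ms.filter (fun m => same_outside locs n m),
           oth ++ ms.filter (fun m => !(same_outside locs n m))) := by
  intro ms
  induction ms with
  | nil => intro grp oth; simp [splitGo]
  | cons m ms ih =>
    intro grp oth
    cases hp : same_outside locs n m <;>
      simp [splitGo, hp, ih, List.filter_cons]

-- while rest: split rest[1:] around rest[0]; append the group; continue on others
def partitionLoop (locs : List Int) : List String → List (List String) → List (List String)
  | [], ans => ans
  | n :: tail, ans =>
    let s := splitGo locs n tail [] []
    partitionLoop locs s.2 (ans ++ [n :: s.1])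
  termination_by rest => rest.length
  decreasing_by
    simp only [splitGo_eq, List.nil_append, List.length_cons]
    exact Nat.lt_succ_of_le (List.length_filter_le _ _)

def gather_lists_alt (l : List String) (locs : List Int) : List (List String) :=
  partitionLoop locs (dedupLoop l PySem.Set.empty []) []

-- ===== PRECONDITION & SPEC =====
def Spec_gather_lists (l : List String) (locs : List Int) (out : List (List String)) : Prop := out = gather_lists_alt l locs
instance (l : List String) (locs : List Int) (out : List (List String)) : Decidable (Spec_gather_lists l locs out) := by unfold Spec_gather_lists; infer_instance

-- ===== CLAIM (what is proved, stated in full; the proofs are below) =====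
def Claim_equal_gather_lists : Prop := ∀ (l : List String) (locs : List Int), Dom_gather_lists l locs → Spec_gather_lists l locs (gather_lists l locs)

-- ===== LEMMAS AND PROOFS =====

-- specification-level ordered dedup with an explicit seen list
def ded : List String → List String → List String
  | _, [] => []
  | S, s :: ss => if S.contains s then ded S ss else s :: ded (s :: S) ss

-- specification-level matched sublist collected by A's inner loop
def matched (locs : List Int) (n : String) : List String → List String → List String
  | _, [] => []
  | S, m :: ms =>
    if S.contains m then matched locs n S ms
    else if same_outside locs n m then m :: matched locs n (m :: S) ms
    else matched locs n S ms

theorem matchExceptGo_eq (locs : List Int) :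
    ∀ xs : List (Int × (Char × Char)), matchExceptGo locs xs = sameOutsideGo locs xs
  | [] => rfl
  | (i, (c1, c2)) :: rest => by
    simp only [matchExceptGo, sameOutsideGo, matchExceptGo_eq locs rest]
    cases hl : locs.contains i <;> by_cases hc : c1 = c2 <;> simp [hc]

theorem match_except_eq (n m : String) (locs : List Int) :
    match_except n m locs = same_outside locs n m := by
  simp [match_except, same_outside, matchExceptGo_eq]

theorem ded_congr (ss : List String) : ∀ (S₁ S₂ : List String),
    (∀ x, S₁.contains x = S₂.contains x) → ded S₁ ss = ded S₂ ss := by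
  induction ss with
  | nil => intro S₁ S₂ h; rfl
  | cons s ss ih =>
    intro S₁ S₂ h
    have hcons : ∀ y : String, (s :: S₁).contains y = (s :: S₂).contains y := fun y => by
      simp only [List.contains_cons, h y]
    simp only [ded, h s, ih S₁ S₂ h, ih (s :: S₁) (s :: S₂) hcons]

theorem dedupLoop_eq (ss : List String) : ∀ (seen : PySem.Set String) (acc : List String),
    dedupLoop ss seen acc = acc ++ ded seen ss := by
  induction ss with
  | nil => intro seen acc; simp [dedupLoop, ded]
  | cons s ss ih =>
    intro seen acc
    cases hc : PySem.Set.contains seen s with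
    | true =>
      have hc' : List.contains seen s = true := hc
      simp only [dedupLoop, ded, hc, hc', if_true]
      exact ih seen acc
    | false =>
      have hc' : List.contains seen s = false := hc
      have hmem : s ∉ (seen : List String) := by simpa using hc'
      simp only [dedupLoop, ded, hc, hc', Bool.false_eq_true, if_false]
      rw [ih _ _]
      rw [show PySem.Set.add seen s = seen ++ [s] from by simp [PySem.Set.add, hmem]]
      rw [ded_congr ss (seen ++ [s]) (s :: seen) (fun x => by
        simp [List.contains_append, List.contains_cons, Bool.or_comm])]
      simp

theorem inner_snd (locs : List Int) (n : String) (ms : List String) :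
    ∀ (used : PySem.Dict String Int) (S curr : List String),
    (∀ x, used.contains x = S.contains x) →
    (innerLoop locs n ms used curr).2 = curr ++ matched locs n S ms := by
  induction ms with
  | nil => intro used S curr h; simp [innerLoop, matched]
  | cons m ms ih =>
    intro used S curr h
    have h1 : ∀ x, (used.insert m 1).contains x = ((m :: S).contains x) := fun x => by
      simp only [PySem.Dict.contains_insert, List.contains_cons, h x]
    cases hS : S.contains m with
    | true =>
      simp only [innerLoop, matched, h m, hS, if_true]
      exact ih used S curr h
    | false =>
      cases hp : same_outside locs n m with
      | true =>
        simp only [innerLoop, matched, h m, hS, match_except_eq, hp, Bool.false_eq_true,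
          if_false, if_true]
        rw [ih (used.insert m 1) (m :: S) (curr ++ [m]) h1]
        simp
      | false =>
        simp only [innerLoop, matched, h m, hS, match_except_eq, hp, Bool.false_eq_true,
          if_false]
        exact ih used S curr h

theorem inner_fst (locs : List Int) (n : String) (ms : List String) :
    ∀ (used : PySem.Dict String Int) (S curr : List String),
    (∀ x, used.contains x = S.contains x) →
    ∀ x, (innerLoop locs n ms used curr).1.contains x
      = (S.contains x || (matched locs n S ms).contains x) := by
  induction ms with
  | nil => intro used S curr h x; simp [innerLoop, matched, h x]
  | cons m ms ih =>
    intro used S curr h x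
    have h1 : ∀ y, (used.insert m 1).contains y = ((m :: S).contains y) := fun y => by
      simp only [PySem.Dict.contains_insert, List.contains_cons, h y]
    cases hS : S.contains m with
    | true =>
      simp only [innerLoop, matched, h m, hS, if_true]
      exact ih used S curr h x
    | false =>
      cases hp : same_outside locs n m with
      | true =>
        simp only [innerLoop, matched, h m, hS, match_except_eq, hp, Bool.false_eq_true,
          if_false, if_true]
        rw [ih (used.insert m 1) (m :: S) (curr ++ [m]) h1 x]
        simp only [List.contains_cons]
        cases x == m <;> cases S.contains x <;> simp
      | false =>
        simp only [innerLoop, matched, h m, hS, match_except_eq, hp, Bool.false_eq_true,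
          if_false]
        exact ih used S curr h x

theorem filter_ded_cons (p : String → Bool) (m : String) (hm : p m = false) :
    ∀ (ms S : List String), (ded (m :: S) ms).filter p = (ded S ms).filter p := by
  intro ms
  induction ms with
  | nil => intro S; rfl
  | cons x ms ih =>
    intro S
    by_cases hxm : x = m
    · subst hxm
      simp only [ded, List.contains_cons, BEq.rfl, Bool.true_or]
      cases hS : S.contains x with
      | true =>
        simp only [if_true]
        exact ih S
      | false =>
        simp only [if_true, Bool.false_eq_true, if_false, List.filter_cons, hm,
          Bool.false_eq_true, if_false]
    · have hbeq : (x == m) = false := by simp [hxm]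
      simp only [ded, List.contains_cons, hbeq, Bool.false_or]
      cases hS : S.contains x with
      | true =>
        simp only [if_true]
        exact ih S
      | false =>
        simp only [Bool.false_eq_true, if_false, List.filter_cons]
        rw [ded_congr ms (x :: m :: S) (m :: x :: S) (fun y => by
          simp only [List.contains_cons]
          cases y == x <;> cases y == m <;> simp)]
        rw [ih (x :: S)]

theorem matched_eq_filter (locs : List Int) (n : String) :
    ∀ (ms S : List String),
      matched locs n S ms = (ded S ms).filter (fun m => same_outside locs n m) := by
  intro ms
  induction ms with
  | nil => intro S; rfl
  | cons m ms ih =>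
    intro S
    cases hS : S.contains m with
    | true =>
      simp only [matched, ded, hS, if_true]
      exact ih S
    | false =>
      cases hp : same_outside locs n m with
      | true =>
        simp only [matched, ded, hS, hp, Bool.false_eq_true, if_false, if_true,
          List.filter_cons, hp]
        rw [ih (m :: S)]
      | false =>
        simp only [matched, ded, hS, hp, Bool.false_eq_true, if_false, List.filter_cons, hp]
        rw [ih S, filter_ded_cons _ m hp]

theorem ded_append_filter (M : List String) :
    ∀ (ms S : List String), ded (S ++ M) ms = (ded S ms).filter (fun x => !(M.contains x)) := by
  intro ms
  induction ms with
  | nil => intro S; rfl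
  | cons x ms ih =>
    intro S
    cases hS : S.contains x with
    | true =>
      simp only [ded, List.contains_append, hS, Bool.true_or, if_true]
      exact ih S
    | false =>
      cases hM : M.contains x with
      | true =>
        simp only [ded, List.contains_append, hS, hM, Bool.false_or, if_true,
          Bool.false_eq_true, if_false, List.filter_cons, Bool.not_true]
        rw [← ih (x :: S)]
        exact ded_congr ms (S ++ M) (x :: S ++ M) (fun y => by
          simp only [List.cons_append, List.contains_cons, List.contains_append]
          cases hyx : y == x
          · simp
          · have hy : y = x := by simpa using hyx
            subst hy
            have hmem : y ∈ M := by simpa using hM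
            simp [hmem])
      | false =>
        simp only [ded, List.contains_append, hS, hM, Bool.false_or, Bool.false_eq_true,
          if_false, List.filter_cons, Bool.not_false, if_true]
        simp only [← List.cons_append]
        rw [ih (x :: S)]

theorem filter_not_contains_filter (p : String → Bool) (L : List String) :
    L.filter (fun x => !((L.filter p).contains x)) = L.filter (fun x => !(p x)) := by
  apply List.filter_congr
  intro x hx
  have : (L.filter p).contains x = p x := by
    cases hpx : p x <;> simp [List.mem_filter, hx, hpx]
  rw [this]

theorem outer_main (l : List String) (locs : List Int) :
    ∀ (t : List String) (i : Nat) (used : PySem.Dict String Int) (S : List String)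
      (ans : List (List String)),
      t = l.drop i → (∀ x, used.contains x = S.contains x) →
      outerLoop l locs (PySem.List.enumerate t (i : Int)) used ans
        = partitionLoop locs (ded S t) ans := by
  intro t
  induction t with
  | nil => intro i used S ans ht h; simp [PySem.List.enumerate, outerLoop, ded, partitionLoop]
  | cons n t' ih =>
    intro i used S ans ht h
    have ht' : t' = l.drop (i + 1) := by
      rw [← List.tail_drop, ← ht]
      rfl
    rw [PySem.List.enumerate_cons]
    have hcast : ((i : Int) + 1) = ((i + 1 : Nat) : Int) := by push_cast; ring
    cases hS : S.contains n with
    | true =>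
      simp only [outerLoop, ded, h n, hS, if_true]
      rw [hcast, ih (i + 1) used S ans ht' h]
    | false =>
      simp only [outerLoop, ded, h n, hS, Bool.false_eq_true, if_false]
      have hslice : PySem.List.slice l (some ((i : Int) + 1)) none = t' := by
        rw [PySem.List.slice_from l (by omega)]
        have h2 : ((i : Int) + 1).toNat = i + 1 := by omega
        rw [h2, ← ht']
      rw [hslice]
      have h1 : ∀ x, (used.insert n 1).contains x = (n :: S).contains x := by
        intro x; simp only [PySem.Dict.contains_insert, List.contains_cons, h x]
      have hsnd := inner_snd locs n t' (used.insert n 1) (n :: S) [n] h1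
      have hfst := inner_fst locs n t' (used.insert n 1) (n :: S) [n] h1
      have hfst' : ∀ x, (innerLoop locs n t' (used.insert n 1) [n]).1.contains x
          = ((n :: S) ++ (matched locs n (n :: S) t')).contains x := by
        intro x; rw [hfst x, List.contains_append]
      rw [hcast, ih (i + 1) _ ((n :: S) ++ matched locs n (n :: S) t') _ ht' hfst']
      rw [partitionLoop]
      simp only [splitGo_eq, List.nil_append]
      congr 1
      · rw [ded_append_filter (matched locs n (n :: S) t') t' (n :: S),
          matched_eq_filter locs n t' (n :: S), filter_not_contains_filter]
      · rw [hsnd, matched_eq_filter locs n t' (n :: S)]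
        simp

-- ===== VERDICT (by name: the statement is the Claim_ definition above) =====
theorem gather_lists_spec : Claim_equal_gather_lists := by
  intro l locs _
  unfold Spec_gather_lists gather_lists gather_lists_alt
  have h := outer_main l locs l 0 PySem.Dict.empty [] [] (by simp) (by simp)
  simpa [dedupLoop_eq, PySem.Set.empty] using h
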